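-- pv_equiv track=rewrite | github.com/MassimoLauria/adventofcode | 2020/aoc21.py | bestguess
-- ===== SOURCE A (Python) =====
-- def bestguess(C):
--     guesses={}
--     for i,a in C:
--         for w in a:
--             if w not in guesses:
--                 guesses[w]=set(i)
--             else:
--                 guesses[w].intersection_update(i)
--     return guesses
-- ===== SOURCE B (Python) =====
-- def bestguess(C):
--     index = {}
--     for i, a in C:
--         for w in a:
--             index.setdefault(w, []).append(i)
--     return {w: set.intersection(*[set(i) for i in lists])
--             for w, lists in index.items()}
-- ===== Notes on version B (the rewrite author's own statement) =====
-- stated objective: alternative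
-- what changed: A maintains a running per-allergen intersection set updated in place while scanning the foods; B first builds an index mapping each allergen to the list of ingredient lists of its foods, then reduces each group with set.intersection in a dict comprehension.
import Mathlib
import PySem

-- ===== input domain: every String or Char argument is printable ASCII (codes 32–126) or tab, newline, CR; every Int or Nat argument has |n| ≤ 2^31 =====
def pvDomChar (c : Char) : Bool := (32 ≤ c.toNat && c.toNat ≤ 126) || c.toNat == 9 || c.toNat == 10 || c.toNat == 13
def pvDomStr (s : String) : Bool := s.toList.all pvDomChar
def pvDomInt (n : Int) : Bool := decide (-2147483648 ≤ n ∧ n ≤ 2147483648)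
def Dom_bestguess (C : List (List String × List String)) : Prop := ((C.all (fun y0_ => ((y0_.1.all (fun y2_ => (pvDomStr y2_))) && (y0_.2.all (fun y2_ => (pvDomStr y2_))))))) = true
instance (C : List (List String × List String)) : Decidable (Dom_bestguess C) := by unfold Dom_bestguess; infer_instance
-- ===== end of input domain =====

-- B replaces A's incremental running-intersection dict with a two-phase decomposition
-- (group the ingredient lists per allergen first, then reduce each group by set
-- intersection); objective: alternative decomposition, same cost.

-- ===== PORT A =====
-- A: one pass over the foods, keeping in `guesses` the running intersection per allergen.
def bestguess (C : List (List String × List String)) : List (String × List String) :=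
  (C.foldl (fun guesses f =>
      f.2.foldl (fun g w =>
        if g.contains w = false then g.insert w (PySem.Set.ofList f.1)
        else g.modify w [] (fun s => PySem.Set.inter s f.1)) guesses)
    PySem.Dict.empty).items

-- ===== PORT B =====
-- set.intersection(*[set(i) for i in ls]) : intersect the sets left to right (ls is never empty in B).
def pvRed (ls : List (List String)) : PySem.Set String :=
  match ls with
  | [] => PySem.Set.empty
  | h :: t => t.foldl (fun s l => PySem.Set.inter s (PySem.Set.ofList l)) (PySem.Set.ofList h)

def bestguess_alt (C : List (List String × List String)) : List (String × List String) :=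
  -- phase 1: index.setdefault(w, []).append(i)
  let index : PySem.Dict String (List (List String)) :=
    C.foldl (fun d f => f.2.foldl (fun d w => d.modify w [] (· ++ [f.1])) d) PySem.Dict.empty
  -- phase 2: the dict comprehension reducing each group
  index.items.map (fun p => (p.1, pvRed p.2))

-- ===== PRECONDITION & SPEC =====
def Spec_bestguess (C : List (List String × List String)) (out : List (String × List String)) : Prop := out = bestguess_alt C
instance (C : List (List String × List String)) (out : List (String × List String)) : Decidable (Spec_bestguess C out) := by unfold Spec_bestguess; infer_instance

-- ===== CLAIM (what is proved, stated in full; the proofs are below) =====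
def Claim_equal_bestguess : Prop := ∀ (C : List (List String × List String)), Dom_bestguess C → Spec_bestguess C (bestguess C)

-- ===== LEMMAS AND PROOFS =====

-- B's grouping dict, with each group reduced: the bridge between the two programs.
def pvMapRed (d : PySem.Dict String (List (List String))) : PySem.Dict String (PySem.Set String) :=
  PySem.Dict.mk (d.items.map (fun p => (p.1, pvRed p.2)))

theorem pvGet?_mapRed (d : PySem.Dict String (List (List String))) (w : String) :
    (pvMapRed d).get? w = (d.get? w).map pvRed := by
  obtain ⟨l⟩ := d
  induction l with
  | nil => rfl
  | cons p t ih =>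
      obtain ⟨k, v⟩ := p
      simp only [pvMapRed, List.map_cons, PySem.Dict.get?_mk_cons] at *
      by_cases h : k == w <;> simp [h, ih]

theorem pvContains_mapRed (d : PySem.Dict String (List (List String))) (w : String) :
    (pvMapRed d).contains w = d.contains w := by
  simp [pvMapRed, PySem.Dict.contains, List.any_map, Function.comp_def]

theorem pvInter_ofList (s : PySem.Set String) (i : List String) :
    PySem.Set.inter s (PySem.Set.ofList i) = PySem.Set.inter s i := by
  simp only [PySem.Set.inter]
  apply List.filter_congr
  intro x _
  simp [PySem.Set.mem_ofList]

theorem pvRed_append (g : List (List String)) (hg : g ≠ []) (i : List String) :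
    pvRed (g ++ [i]) = PySem.Set.inter (pvRed g) i := by
  obtain ⟨h, t, rfl⟩ := List.exists_cons_of_ne_nil hg
  simp [pvRed, List.foldl_append, pvInter_ofList]

theorem pvStep (w : String) (i : List String) (d : PySem.Dict String (List (List String)))
    (hne : ∀ p ∈ d.items, p.2 ≠ []) :
    (if (pvMapRed d).contains w = false then (pvMapRed d).insert w (PySem.Set.ofList i)
     else (pvMapRed d).modify w [] (fun s => PySem.Set.inter s i))
      = pvMapRed (d.modify w [] (· ++ [i])) := by
  rw [pvContains_mapRed]
  by_cases hc : d.contains w = true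
  · -- key present: both sides rewrite the pair at w in place
    obtain ⟨g, hg⟩ : ∃ g, d.get? w = some g := by
      rcases h : d.get? w with _ | g
      · rw [PySem.Dict.contains_eq_isSome_get?, h] at hc; simp at hc
      · exact ⟨g, rfl⟩
    have hgne : g ≠ [] := hne (w, g) (PySem.Dict.mem_items_of_get?_eq_some d hg)
    have hmr : (pvMapRed d).contains w = true := by rw [pvContains_mapRed]; exact hc
    simp only [hc, Bool.true_eq_false, if_false]
    simp only [PySem.Dict.modify, PySem.Dict.getD_of_get?_eq_some d [] hg,
      PySem.Dict.getD_of_get?_eq_some (pvMapRed d) [] (by rw [pvGet?_mapRed, hg]; rfl :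
        (pvMapRed d).get? w = some (pvRed g))]
    simp only [PySem.Dict.insert, hmr, hc, if_true]
    simp only [pvMapRed, List.map_map]
    congr 1
    apply List.map_congr_left
    intro p _
    by_cases hp : p.1 = w
    · simp [hp, pvRed_append g hgne i]
    · simp [hp]
  · -- key absent: both sides append a fresh pair
    simp only [Bool.not_eq_true] at hc
    have hmr : (pvMapRed d).contains w = false := by rw [pvContains_mapRed]; exact hc
    simp only [hc, if_true]
    simp only [PySem.Dict.modify, PySem.Dict.getD_of_not_contains d [] hc]
    simp only [PySem.Dict.insert, hc, hmr, Bool.false_eq_true, if_false]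
    simp [pvMapRed, pvRed]

theorem pvStep_ne (w : String) (i : List String) (d : PySem.Dict String (List (List String)))
    (hne : ∀ p ∈ d.items, p.2 ≠ []) :
    ∀ p ∈ (d.modify w [] (· ++ [i])).items, p.2 ≠ [] := by
  intro p hp
  simp only [PySem.Dict.modify] at hp
  rcases (PySem.Dict.mem_items_insert _ _ _ _).1 hp with h | ⟨h, _⟩
  · subst h; simp
  · exact hne _ h

theorem pvInner (a : List String) (i : List String)
    (d : PySem.Dict String (List (List String))) (hne : ∀ p ∈ d.items, p.2 ≠ []) :
    (a.foldl (fun g w =>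
        if g.contains w = false then g.insert w (PySem.Set.ofList i)
        else g.modify w [] (fun s => PySem.Set.inter s i)) (pvMapRed d)
      = pvMapRed (a.foldl (fun d w => d.modify w [] (· ++ [i])) d))
    ∧ ∀ p ∈ (a.foldl (fun d w => d.modify w [] (· ++ [i])) d).items, p.2 ≠ [] := by
  induction a generalizing d with
  | nil => exact ⟨rfl, hne⟩
  | cons w t ih =>
      simp only [List.foldl_cons]
      rw [pvStep w i d hne]
      exact ih _ (pvStep_ne w i d hne)

theorem pvOuter (C : List (List String × List String))
    (d : PySem.Dict String (List (List String))) (hne : ∀ p ∈ d.items, p.2 ≠ []) :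
    C.foldl (fun guesses f =>
        f.2.foldl (fun g w =>
          if g.contains w = false then g.insert w (PySem.Set.ofList f.1)
          else g.modify w [] (fun s => PySem.Set.inter s f.1)) guesses) (pvMapRed d)
      = pvMapRed (C.foldl (fun d f => f.2.foldl (fun d w => d.modify w [] (· ++ [f.1])) d) d) := by
  induction C generalizing d with
  | nil => rfl
  | cons f t ih =>
      simp only [List.foldl_cons]
      obtain ⟨h1, h2⟩ := pvInner f.2 f.1 d hne
      rw [h1]
      exact ih _ h2

-- ===== VERDICT (by name: the statement is the Claim_ definition above) =====
theorem bestguess_spec : Claim_equal_bestguess := by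
  intro C _
  unfold Spec_bestguess bestguess bestguess_alt
  have h := pvOuter C PySem.Dict.empty (by intro p hp; simp [PySem.Dict.empty] at hp)
  have he : pvMapRed PySem.Dict.empty = PySem.Dict.empty := rfl
  rw [he] at h
  rw [h]
  rfl
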